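-- pv_equiv track=rewrite | github.com/benblack769/psm_interp | old/oldGAS/oldhelp.py | RemoveEmptyLinesAndMapLines
-- ===== SOURCE A (Python) =====
-- def IsFunction(line):
--     if line.count('"') > 0:#nothing with a quote will be useful, and it could have a colon in it
--         return False
--     elif line.count(':') > 0:
--         return True
--     else:
--         return False
--
-- def RemoveEmptyLinesAndMapLines(lines):
--     new = []
--     LineMap = dict()
--     for lnum in range(len(lines)):
--         l = lines[lnum]
--
--         LineMap[lnum+1] = len(new)#line numbers start at 1 for user, 0 for computer
--
--         if len(l.split()) > 0 and not IsFunction(l):#if it has any non-whitespace and is not a function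
--             new.append(l)
--
--     return new,LineMap
-- ===== SOURCE B (Python) =====
-- def IsFunction(line):
--     return '"' not in line and ':' in line
--
-- def RemoveEmptyLinesAndMapLines(lines):
--     keep = [bool(l.split()) and not IsFunction(l) for l in lines]
--     offsets = []
--     c = 0
--     for k in keep:
--         offsets.append(c)
--         c += int(k)
--     LineMap = {i + 1: off for i, off in enumerate(offsets)}
--     new = [l for l, k in zip(lines, keep) if k]
--     return new, LineMap
-- ===== Notes on version B (the rewrite author's own statement) =====
-- stated objective: alternative
-- what changed: Replaces A's single interleaved index loop that mutates a list and a dict together with a three-stage pipeline: a keep-flag list, a running prefix-count table giving the line-number map, and a comprehension filtering the kept lines; the quote/colon test uses 'in' instead of count().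
import Mathlib
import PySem

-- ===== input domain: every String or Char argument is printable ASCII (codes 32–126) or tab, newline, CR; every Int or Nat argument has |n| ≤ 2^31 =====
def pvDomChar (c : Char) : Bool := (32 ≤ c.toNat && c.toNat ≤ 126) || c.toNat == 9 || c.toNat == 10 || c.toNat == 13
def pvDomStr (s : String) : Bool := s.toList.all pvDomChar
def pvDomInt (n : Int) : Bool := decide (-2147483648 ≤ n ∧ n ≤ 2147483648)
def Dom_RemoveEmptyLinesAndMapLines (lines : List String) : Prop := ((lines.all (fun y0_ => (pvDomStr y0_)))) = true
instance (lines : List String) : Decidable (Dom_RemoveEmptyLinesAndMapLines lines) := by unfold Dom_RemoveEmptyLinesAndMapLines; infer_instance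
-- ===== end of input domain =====

-- B replaces A's single interleaved index loop (list and dict mutated together) by a
-- three-stage pipeline: keep-flags, a running prefix-count table for the line map, and a
-- filtering comprehension for the kept lines (objective: alternative decomposition).


-- ===== PORT A =====
def IsFunction (line : String) : Bool :=
  if PySem.Str.count line "\"" > 0 then false
  else if PySem.Str.count line ":" > 0 then true
  else false

def RemoveEmptyLinesAndMapLines (lines : List String) : List String × (List (Int × Int)) :=
  let st := (PySem.List.pyRange 0 lines.length 1).foldl
    (fun (st : List String × PySem.Dict Int Int) lnum =>
      let l := PySem.List.pyGetD lines lnum ""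
      let lm := st.2.insert (lnum + 1) (st.1.length : Int)
      if (PySem.Str.split₀ l).length > 0 && !IsFunction l then (st.1 ++ [l], lm)
      else (st.1, lm))
    ([], PySem.Dict.empty)
  (st.1, st.2.items)

-- ===== PORT B =====
def IsFunctionB (line : String) : Bool :=
  !PySem.Str.isIn "\"" line && PySem.Str.isIn ":" line

def RemoveEmptyLinesAndMapLines_alt (lines : List String) : List String × (List (Int × Int)) :=
  let keep := lines.map (fun l => decide (PySem.Str.split₀ l ≠ []) && !IsFunctionB l)
  let offsets := (keep.foldl
    (fun (st : List Int × Int) k => (st.1 ++ [st.2], st.2 + (if k then 1 else 0)))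
    ([], 0)).1
  let lineMap := (PySem.List.enumerate offsets 0).map (fun p => (p.1 + 1, p.2))
  let new := ((lines.zip keep).filter (fun p => p.2)).map (fun p => p.1)
  (new, lineMap)

-- ===== PRECONDITION & SPEC =====
def Spec_RemoveEmptyLinesAndMapLines (lines : List String) (out : List String × (List (Int × Int))) : Prop := out = RemoveEmptyLinesAndMapLines_alt lines
instance (lines : List String) (out : List String × (List (Int × Int))) : Decidable (Spec_RemoveEmptyLinesAndMapLines lines out) := by unfold Spec_RemoveEmptyLinesAndMapLines; infer_instance

-- ===== CLAIM (what is proved, stated in full; the proofs are below) =====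
def Claim_equal_RemoveEmptyLinesAndMapLines : Prop := ∀ (lines : List String), Dom_RemoveEmptyLinesAndMapLines lines → Spec_RemoveEmptyLinesAndMapLines lines (RemoveEmptyLinesAndMapLines lines)

-- ===== LEMMAS AND PROOFS =====

-- the keep test, shared shape of both ports
def pvKeep (l : String) : Bool :=
  decide (PySem.Str.split₀ l ≠ []) && !IsFunctionB l

-- reference line map: entries (i+1, c), c counting kept lines among the first i
def pvLMap (ls : List String) (i : Int) (c : Int) : List (Int × Int) :=
  match ls with
  | [] => []
  | l :: t => (i + 1, c) :: pvLMap t (i + 1) (c + (if pvKeep l then 1 else 0))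

-- the prefix-count table behind B's offsets loop
def pvOffsets (ks : List Bool) (c : Int) : List Int :=
  match ks with
  | [] => []
  | k :: t => c :: pvOffsets t (c + (if k then 1 else 0))

-- PySem.Chars.count.go never decreases the accumulator (no library lemma exists for count.go)
theorem pvCountGo_le (sub : List Char) (fuel : Nat) : ∀ (s : List Char) (acc : Nat),
    acc ≤ PySem.Chars.count.go sub fuel s acc := by
  induction fuel with
  | zero => intro s acc; simp [PySem.Chars.count.go]
  | succ f ih =>
    intro s acc
    match s with
    | [] => simp [PySem.Chars.count.go]
    | h :: t =>
      rw [PySem.Chars.count.go]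
      split
      · exact le_trans (Nat.le_succ acc) (ih _ _)
      · exact ih _ _

-- count.go leaves the accumulator unchanged exactly when sub does not occur
theorem pvCountGo_eq_iff (sub : List Char) (hsub : sub ≠ []) (fuel : Nat) :
    ∀ (s : List Char) (acc : Nat), s.length ≤ fuel →
      (PySem.Chars.count.go sub fuel s acc = acc ↔ ¬ sub <:+: s) := by
  induction fuel with
  | zero =>
    intro s acc hlen
    have : s = [] := List.eq_nil_of_length_eq_zero (Nat.le_zero.mp hlen)
    subst this
    simp [PySem.Chars.count.go, List.infix_nil, hsub]
  | succ f ih =>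
    intro s acc hlen
    match s with
    | [] => simp [PySem.Chars.count.go, List.infix_nil, hsub]
    | h :: t =>
      rw [PySem.Chars.count.go]
      by_cases hp : sub.isPrefixOf (h :: t)
      · rw [if_pos hp]
        have hpre : sub <+: h :: t := List.isPrefixOf_iff_prefix.mp hp
        have hge := pvCountGo_le sub f (List.drop sub.length (h :: t)) (acc + 1)
        constructor
        · intro habs; omega
        · intro hni; exact absurd hpre.isInfix hni
      · rw [if_neg hp]
        have hpre : ¬ sub <+: h :: t := fun hc => hp (List.isPrefixOf_iff_prefix.mpr hc)
        have hlt : t.length ≤ f := by simpa using hlen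
        rw [ih t acc hlt]
        constructor
        · intro hni hc
          rcases List.infix_cons_iff.mp hc with hc1 | hc2
          · exact hpre hc1
          · exact hni hc2
        · intro hni hc; exact hni (List.infix_cons_iff.mpr (Or.inr hc))

-- 'l.count(sub) > 0' is 'sub in l', for nonempty sub
theorem pvCount_pos_iff (s sub : String) (hsub : sub.toList ≠ []) :
    (0 < PySem.Str.count s sub) ↔ PySem.Str.isIn sub s = true := by
  rw [PySem.Str.count_eq, PySem.Str.isIn_eq, PySem.Chars.isIn_iff_infix]
  unfold PySem.Chars.count
  rw [if_neg (by simpa [List.isEmpty_iff] using hsub)]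
  rw [Nat.pos_iff_ne_zero, Ne, pvCountGo_eq_iff sub.toList hsub s.toList.length s.toList 0 (le_refl _)]
  exact not_not

theorem pvIsFunction_eq (l : String) : IsFunction l = IsFunctionB l := by
  unfold IsFunction IsFunctionB
  have h1 := pvCount_pos_iff l "\"" (by decide)
  have h2 := pvCount_pos_iff l ":" (by decide)
  cases hq : PySem.Str.isIn "\"" l <;> cases hc : PySem.Str.isIn ":" l <;>
    simp_all

-- A's branch test is the shared keep test
theorem pvCond_eq (l : String) :
    (decide ((PySem.Str.split₀ l).length > 0) && !IsFunction l) = pvKeep l := by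
  rw [pvIsFunction_eq]
  unfold pvKeep
  congr 1
  simp [List.length_pos_iff]

-- A's loop with the branch test already rewritten to pvKeep, generalized over a
-- processed prefix of the lines
theorem pvA_loop (suf : List String) : ∀ (pre acc : List String) (d : PySem.Dict Int Int),
    (∀ k ∈ d.keys, k ≤ (pre.length : Int)) →
    ((PySem.List.pyRange (pre.length : Int) (((pre ++ suf).length : Nat) : Int) 1).foldl
      (fun (st : List String × PySem.Dict Int Int) lnum =>
        if pvKeep (PySem.List.pyGetD (pre ++ suf) lnum "") = true
        then (st.1 ++ [PySem.List.pyGetD (pre ++ suf) lnum ""],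
              st.2.insert (lnum + 1) (st.1.length : Int))
        else (st.1, st.2.insert (lnum + 1) (st.1.length : Int))) (acc, d)) =
      (acc ++ suf.filter pvKeep,
       PySem.Dict.mk (d.items ++ pvLMap suf (pre.length : Int) (acc.length : Int))) := by
  induction suf with
  | nil =>
    intro pre acc d hd
    rw [PySem.List.pyRange_one_eq_nil (by simp)]
    simp [pvLMap]
  | cons l t ih =>
    intro pre acc d hd
    have hab : (pre.length : Int) < (((pre ++ l :: t).length : Nat) : Int) := by
      simp only [List.length_append, List.length_cons]; omega
    rw [PySem.List.pyRange_one_cons hab, List.foldl_cons]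
    have hget : PySem.List.pyGetD (pre ++ l :: t) (pre.length : Int) "" = l := by
      rw [PySem.List.pyGetD_natCast]
      simp [List.getD]
    have hfresh : d.contains ((pre.length : Int) + 1) = false := by
      by_contra hcon
      have hmem : ((pre.length : Int) + 1) ∈ d.keys :=
        (PySem.Dict.contains_iff_mem_keys d _).mp (by simpa using hcon)
      have := hd _ hmem
      omega
    have hitems : (d.insert ((pre.length : Int) + 1) (acc.length : Int)).items
        = d.items ++ [(((pre.length : Int) + 1), (acc.length : Int))] :=
      PySem.Dict.items_insert_of_not_contains d _ hfresh
    have hkeys : ∀ k ∈ (d.insert ((pre.length : Int) + 1) (acc.length : Int)).keys,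
        k ≤ ((pre ++ [l]).length : Int) := by
      intro k hk
      rcases (PySem.Dict.mem_keys_insert d _ k _).mp hk with h | h
      · subst h; simp
      · have := hd _ h; simp only [List.length_append, List.length_singleton]; omega
    have hlen1 : ((pre.length : Int) + 1) = (((pre ++ [l]).length : Nat) : Int) := by
      simp
    rw [hlen1] at hitems
    simp only [hget]
    by_cases hk : pvKeep l = true
    · rw [if_pos hk]
      rw [List.filter_cons, if_pos hk]
      simp only [pvLMap, hk]
      rw [List.append_cons pre l t]
      rw [hlen1]
      have hrest := ih (pre ++ [l]) (acc ++ [l])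
        (d.insert ((pre.length : Int) + 1) (acc.length : Int)) hkeys
      rw [hlen1] at hrest
      rw [hrest, hitems]
      simp [List.append_assoc, List.length_append]
    · rw [if_neg hk]
      rw [List.filter_cons, if_neg hk]
      simp only [pvLMap, hk]
      rw [List.append_cons pre l t]
      rw [hlen1]
      have hrest := ih (pre ++ [l]) acc
        (d.insert ((pre.length : Int) + 1) (acc.length : Int)) hkeys
      rw [hlen1] at hrest
      rw [hrest, hitems]
      simp [List.append_assoc]

-- B's offsets loop builds the prefix-count table
theorem pvB_offsets (ks : List Bool) : ∀ (os : List Int) (c : Int),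
    (ks.foldl (fun (st : List Int × Int) k => (st.1 ++ [st.2], st.2 + (if k then 1 else 0)))
      (os, c)).1 = os ++ pvOffsets ks c := by
  induction ks with
  | nil => intro os c; simp [pvOffsets]
  | cons k t ih =>
    intro os c
    rw [List.foldl_cons, ih]
    simp [pvOffsets, List.append_assoc]

-- enumerating the prefix-count table gives the reference line map
theorem pvB_lineMap (ls : List String) : ∀ (i c : Int),
    (PySem.List.enumerate (pvOffsets (ls.map pvKeep) c) i).map (fun p => (p.1 + 1, p.2)) =
      pvLMap ls i c := by
  induction ls with
  | nil => intro i c; simp [pvOffsets, pvLMap, PySem.List.enumerate_nil]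
  | cons l t ih =>
    intro i c
    simp only [List.map_cons, pvOffsets, pvLMap, PySem.List.enumerate_cons, List.map_cons]
    rw [ih]

-- the zip-filter comprehension is a plain filter
theorem pvB_new (ls : List String) :
    (((ls.zip (ls.map pvKeep)).filter (fun p => p.2)).map (fun p => p.1)) = ls.filter pvKeep := by
  induction ls with
  | nil => simp
  | cons l t ih =>
    simp only [List.map_cons, List.zip_cons_cons, List.filter_cons]
    by_cases hk : pvKeep l = true
    · simp [hk, ih]
    · simp [Bool.eq_false_iff.mpr hk, ih]

-- ===== VERDICT (by name: the statement is the Claim_ definition above) =====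
theorem RemoveEmptyLinesAndMapLines_spec : Claim_equal_RemoveEmptyLinesAndMapLines := by
  intro lines _
  unfold Spec_RemoveEmptyLinesAndMapLines RemoveEmptyLinesAndMapLines RemoveEmptyLinesAndMapLines_alt
  simp only [pvCond_eq]
  have hA := pvA_loop lines [] [] PySem.Dict.empty (by simp)
  simp only [List.nil_append, List.length_nil, Nat.cast_zero] at hA
  rw [hA]
  simp only [show (fun l => decide (PySem.Str.split₀ l ≠ []) && !IsFunctionB l) = pvKeep from rfl]
  rw [pvB_offsets, pvB_new, List.nil_append, pvB_lineMap]
  rfl
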